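-- pv_equiv track=rewrite | github.com/pypi-data/pypi-mirror-282 | packages/typsytex/typsytex-1.0.1-py3-none-any.whl/typsytex.py | math_mode_fragments
-- ===== SOURCE A (Python) =====
-- def math_mode_fragments(text: str, math_mode_mask: list[bool]):
--     r"""
--     math_mode_fragments generates a list of tuples (start, end) enumerating all substrings in `text` which
--     are in math mode.
--     """
--     i = 0
--     while i < len(text):
--         if not math_mode_mask[i]:
--             i += 1
--             continue
--         math_mode_start = i
--         math_mode_end = math_mode_start
--         while math_mode_end < len(text) and math_mode_mask[math_mode_end]:
--             math_mode_end += 1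
--         yield (math_mode_start, math_mode_end)
--         i = math_mode_end
-- ===== SOURCE B (Python) =====
-- def math_mode_fragments(text: str, math_mode_mask: list[bool]):
--     # Flat state machine: one pass, `start` is None while outside math mode.
--     start = None
--     for i in range(len(text)):
--         if math_mode_mask[i]:
--             if start is None:
--                 start = i
--         else:
--             if start is not None:
--                 yield (start, i)
--                 start = None
--     if start is not None:
--         yield (start, len(text))
-- ===== Notes on version B (the rewrite author's own statement) =====
-- stated objective: alternative
-- what changed: Replaced A's nested scan-and-jump (outer index loop with an inner while that scans each run and jumps past it) by a flat single-state machine: one for-loop over all indices keeping only an optional run-start, emitting a fragment whenever a run ends, plus a final flush at end-of-text.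
import Mathlib
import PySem

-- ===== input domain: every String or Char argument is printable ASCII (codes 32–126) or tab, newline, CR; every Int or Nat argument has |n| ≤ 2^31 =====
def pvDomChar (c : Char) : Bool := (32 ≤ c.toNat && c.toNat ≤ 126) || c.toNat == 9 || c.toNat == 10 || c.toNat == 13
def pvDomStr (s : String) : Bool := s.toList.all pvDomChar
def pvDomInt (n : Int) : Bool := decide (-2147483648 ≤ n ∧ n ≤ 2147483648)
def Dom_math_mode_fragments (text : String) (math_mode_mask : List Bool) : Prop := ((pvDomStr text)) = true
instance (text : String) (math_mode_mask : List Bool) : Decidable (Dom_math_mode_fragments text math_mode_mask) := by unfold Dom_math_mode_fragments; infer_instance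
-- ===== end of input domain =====

-- B replaces A's nested scan-and-jump by a flat one-state machine over all indices (alternative decomposition, same cost).


-- ===== PORT A =====
-- inner while loop: `while math_mode_end < len(text) and math_mode_mask[math_mode_end]: math_mode_end += 1`
-- (mask access is `getD … false`; Pre_ guarantees every accessed index is in range, so it is exact there)
def pvScanA (mask : List Bool) (n e : Nat) : Nat :=
  if h : e < n ∧ mask.getD e false = true then pvScanA mask n (e + 1) else e
termination_by n - e
decreasing_by omega

-- the port's outer loop needs this to terminate: the inner while only moves forward
theorem pvScanA_le (mask : List Bool) (n e : Nat) : e ≤ pvScanA mask n e := by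
  rw [pvScanA]
  split
  · exact le_trans (Nat.le_succ e) (pvScanA_le mask n (e + 1))
  · exact le_refl e
termination_by n - e
decreasing_by rename_i h; omega

-- outer while loop of A
def pvGoA (mask : List Bool) (n i : Nat) : List (Int × Int) :=
  if h : i < n then
    if hm : mask.getD i false = true then
      let e := pvScanA mask n i
      ((i : Int), (e : Int)) :: pvGoA mask n e
    else pvGoA mask n (i + 1)
  else []
termination_by n - i
decreasing_by
  · have h1 : i + 1 ≤ pvScanA mask n i := by
      rw [pvScanA]; rw [dif_pos ⟨h, hm⟩]
      exact Nat.succ_le_of_lt (Nat.lt_of_lt_of_le (Nat.lt_succ_self i) (pvScanA_le mask n (i + 1)))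
    omega
  · omega

def math_mode_fragments (text : String) (math_mode_mask : List Bool) : List (Int × Int) :=
  pvGoA math_mode_mask text.toList.length 0

-- ===== PORT B =====
-- the for-loop of B: state is (accumulated fragments, optional current run start)
def pvLoopB (mask : List Bool) (xs : List Nat) (acc : List (Int × Int)) (start : Option Nat) :
    List (Int × Int) × Option Nat :=
  match xs with
  | [] => (acc, start)
  | i :: rest =>
    if mask.getD i false = true then
      match start with
      | none => pvLoopB mask rest acc (some i)
      | some _ => pvLoopB mask rest acc start
    else
      match start with
      | some s => pvLoopB mask rest (acc ++ [((s : Int), (i : Int))]) none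
      | none => pvLoopB mask rest acc start

def math_mode_fragments_alt (text : String) (math_mode_mask : List Bool) : List (Int × Int) :=
  let n := text.toList.length
  let p := pvLoopB math_mode_mask (List.range n) [] none
  match p.2 with
  | some s => p.1 ++ [((s : Int), (n : Int))]
  | none => p.1

-- ===== PRECONDITION & SPEC =====
-- A accesses math_mode_mask[i] for every i < len(text); it raises IndexError iff the mask is shorter than the text.
def Pre_math_mode_fragments (text : String) (math_mode_mask : List Bool) : Prop :=
  text.toList.length ≤ math_mode_mask.length
instance (text : String) (math_mode_mask : List Bool) : Decidable (Pre_math_mode_fragments text math_mode_mask) := by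
  unfold Pre_math_mode_fragments; infer_instance
def pvWitness_math_mode_fragments : String × List Bool := ("a$b", [false, true, false])

def Spec_math_mode_fragments (text : String) (math_mode_mask : List Bool) (out : List (Int × Int)) : Prop := out = math_mode_fragments_alt text math_mode_mask
instance (text : String) (math_mode_mask : List Bool) (out : List (Int × Int)) : Decidable (Spec_math_mode_fragments text math_mode_mask out) := by unfold Spec_math_mode_fragments; infer_instance

-- ===== CLAIM (what is proved, stated in full; the proofs are below) =====
def Claim_equal_math_mode_fragments : Prop := ∀ (text : String) (math_mode_mask : List Bool), Dom_math_mode_fragments text math_mode_mask → Pre_math_mode_fragments text math_mode_mask → Spec_math_mode_fragments text math_mode_mask (math_mode_fragments text math_mode_mask)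

-- ===== LEMMAS AND PROOFS =====

-- the final flush of B, factored out for the loop invariant
def pvFlush (n : Nat) (p : List (Int × Int) × Option Nat) : List (Int × Int) :=
  match p.2 with
  | some s => p.1 ++ [((s : Int), (n : Int))]
  | none => p.1

-- loop invariant: B's machine run from index i (with k = n - i steps left) produces,
-- after the final flush, exactly what A's scan-and-jump produces from i.
theorem pvLoopB_spec (mask : List Bool) (n : Nat) :
    ∀ (k i : Nat) (acc : List (Int × Int)) (start : Option Nat), i + k = n →
    pvFlush n (pvLoopB mask (List.range' i k) acc start) =
      (match start with
       | some s => acc ++ ((s : Int), ((pvScanA mask n i : Nat) : Int)) :: pvGoA mask n (pvScanA mask n i)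
       | none => acc ++ pvGoA mask n i) := by
  intro k
  induction k with
  | zero =>
    intro i acc start h
    have hi : i = n := by omega
    subst hi
    have hgo : pvGoA mask i i = [] := by rw [pvGoA]; rw [dif_neg (by omega)]
    cases start with
    | none => simp [pvLoopB, pvFlush, hgo]
    | some s =>
      have hs : pvScanA mask i i = i := by rw [pvScanA]; rw [dif_neg (by omega)]
      simp [pvLoopB, pvFlush, hs, hgo]
  | succ k ih =>
    intro i acc start h
    have hin : i < n := by omega
    rw [List.range'_succ]
    by_cases hm : mask.getD i false = true
    · have hscan : pvScanA mask n i = pvScanA mask n (i + 1) := by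
        rw [pvScanA]; rw [dif_pos ⟨hin, hm⟩]
      cases start with
      | none =>
        simp only [pvLoopB, hm, if_pos]
        rw [ih (i + 1) acc (some i) (by omega)]
        have hA : pvGoA mask n i =
            ((i : Int), ((pvScanA mask n i : Nat) : Int)) :: pvGoA mask n (pvScanA mask n i) := by
          rw [pvGoA]; rw [dif_pos hin, dif_pos hm]
        simp [hA, hscan]
      | some s =>
        simp only [pvLoopB, hm, if_pos]
        rw [ih (i + 1) acc (some s) (by omega)]
        simp [hscan]
    · have hscan : pvScanA mask n i = i := by
        rw [pvScanA]; rw [dif_neg]; tauto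
      have hA : pvGoA mask n i = pvGoA mask n (i + 1) := by
        rw [pvGoA]; rw [dif_pos hin, dif_neg hm]
      cases start with
      | none =>
        simp only [pvLoopB, hm, if_neg, Bool.false_eq_true, not_false_iff]
        rw [ih (i + 1) acc none (by omega)]
        simp [hA]
      | some s =>
        simp only [pvLoopB, hm, if_neg, Bool.false_eq_true, not_false_iff]
        rw [ih (i + 1) (acc ++ [((s : Int), (i : Int))]) none (by omega)]
        simp [hscan, hA]

theorem alt_eq_goA (text : String) (mask : List Bool) :
    math_mode_fragments_alt text mask = pvGoA mask text.toList.length 0 := by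
  unfold math_mode_fragments_alt
  have h := pvLoopB_spec mask text.toList.length text.toList.length 0 [] none (by omega)
  simp only [pvFlush] at h
  simpa [List.range_eq_range'] using h

-- ===== VERDICT (by name: the statement is the Claim_ definition above) =====
theorem math_mode_fragments_spec : Claim_equal_math_mode_fragments := by
  intro text mask _ _
  unfold Spec_math_mode_fragments math_mode_fragments
  rw [alt_eq_goA]
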